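-- pv_equiv track=rewrite | github.com/Omer-Omerco/blueprint-extractor | scripts/build_unified_rag.py | detect_types_from_csi
-- ===== SOURCE A (Python) =====
-- CSI_TYPE_MAPPING = {
--     # Peinture et revêtements
--     "09 91": "peinture",
--     "09 90": "peinture",
--
--     # Planchers
--     "09 65": "plancher",
--     "09 68": "plancher",
--     "09 64": "plancher",
--     "09 63": "plancher",
--     "09 62": "plancher",
--
--     # Portes et cadres
--     "08 11": "porte",
--     "08 14": "porte",
--     "08 12": "porte",
--     "08 71": "quincaillerie_porte",
--
--     # Fenêtres
--     "08 51": "fenêtre",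
--     "08 52": "fenêtre",
--     "08 53": "fenêtre",
--     "08 50": "fenêtre",
--
--     # Plafonds
--     "09 51": "plafond",
--     "09 54": "plafond",
--
--     # Murs et cloisons
--     "09 21": "mur",
--     "09 22": "mur",
--     "09 29": "mur",
--     "04 22": "maçonnerie",
--
--     # Céramique
--     "09 30": "céramique",
--     "09 31": "céramique",
--
--     # Isolation
--     "07 21": "isolation",
--     "07 22": "isolation",
--     "07 27": "isolation",
--
--     # Étanchéité
--     "07 92": "étanchéité",
--     "07 90": "étanchéité",
--
--     # Toiture
--     "07 50": "toiture",
--     "07 51": "toiture",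
--     "07 52": "toiture",
--
--     # Acier/Métaux
--     "05 12": "acier",
--     "05 21": "acier",
--     "05 50": "métaux",
--
--     # Béton
--     "03 30": "béton",
--     "03 31": "béton",
--
--     # Électricité
--     "26": "électricité",
--
--     # Mécanique/Plomberie
--     "22": "plomberie",
--     "23": "mécanique",
--
--     # Gicleurs
--     "21 13": "gicleurs",
-- }
--
-- def detect_types_from_csi(csi_code: str) -> list[str]:
--     """Detect material types from CSI code."""
--     types = []
--     if not csi_code:
--         return types
--
--     for prefix, mat_type in CSI_TYPE_MAPPING.items():
--         if csi_code.startswith(prefix):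
--             types.append(mat_type)
--             break
--
--     return types
-- ===== SOURCE B (Python) =====
-- # B: the flat prefix scan is replaced by a two-level table keyed first by the 2-char
-- # CSI family, then by the 3-char suffix ("" marks a whole-family entry): two direct
-- # dict lookups instead of a 40-entry startswith scan.
-- CSI_BY_FAMILY = {
--     "09": {
--         " 91": "peinture", " 90": "peinture",
--         " 65": "plancher", " 68": "plancher", " 64": "plancher",
--         " 63": "plancher", " 62": "plancher",
--         " 51": "plafond", " 54": "plafond",
--         " 21": "mur", " 22": "mur", " 29": "mur",
--         " 30": "céramique", " 31": "céramique",
--     },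
--     "08": {
--         " 11": "porte", " 14": "porte", " 12": "porte",
--         " 71": "quincaillerie_porte",
--         " 51": "fenêtre", " 52": "fenêtre", " 53": "fenêtre", " 50": "fenêtre",
--     },
--     "04": {" 22": "maçonnerie"},
--     "07": {
--         " 21": "isolation", " 22": "isolation", " 27": "isolation",
--         " 92": "étanchéité", " 90": "étanchéité",
--         " 50": "toiture", " 51": "toiture", " 52": "toiture",
--     },
--     "05": {" 12": "acier", " 21": "acier", " 50": "métaux"},
--     "03": {" 30": "béton", " 31": "béton"},
--     "26": {"": "électricité"},
--     "22": {"": "plomberie"},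
--     "23": {"": "mécanique"},
--     "21": {" 13": "gicleurs"},
-- }
--
--
-- def detect_types_from_csi(csi_code: str) -> list[str]:
--     """Detect material types from CSI code."""
--     sub = CSI_BY_FAMILY.get(csi_code[:2])
--     if sub is None:
--         return []
--     mat = sub.get(csi_code[2:5])
--     if mat is None:
--         mat = sub.get("")
--     return [mat] if mat is not None else []
-- ===== Notes on version B (the rewrite author's own statement) =====
-- stated objective: faster
-- what changed: A scans all 40 mapping entries in insertion order testing startswith on each; B reorganises the data into a two-level table keyed by the 2-char CSI family and then by the 3-char suffix (with "" for whole-family codes), so a call does at most three direct dict lookups instead of a 40-entry prefix scan.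
import Mathlib
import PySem

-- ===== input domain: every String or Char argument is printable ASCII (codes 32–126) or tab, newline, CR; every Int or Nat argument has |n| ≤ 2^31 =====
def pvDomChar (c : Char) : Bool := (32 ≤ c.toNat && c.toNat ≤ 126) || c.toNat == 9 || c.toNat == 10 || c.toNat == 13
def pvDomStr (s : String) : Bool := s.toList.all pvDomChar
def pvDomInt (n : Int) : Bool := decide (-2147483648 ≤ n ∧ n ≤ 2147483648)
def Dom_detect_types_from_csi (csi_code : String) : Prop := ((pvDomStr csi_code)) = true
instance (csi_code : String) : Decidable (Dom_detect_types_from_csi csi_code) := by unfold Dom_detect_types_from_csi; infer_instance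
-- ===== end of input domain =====

-- B replaces the flat 40-entry startswith scan by a two-level table keyed by the 2-char CSI
-- family and then by the 3-char suffix ("" = whole-family code): at most three dict lookups (faster, constant-factor).

-- ===== PORT A =====
-- CSI_TYPE_MAPPING, the module-level dict A reads
def csiItems : List (String × String) := [
  ("09 91", "peinture"),
  ("09 90", "peinture"),
  ("09 65", "plancher"),
  ("09 68", "plancher"),
  ("09 64", "plancher"),
  ("09 63", "plancher"),
  ("09 62", "plancher"),
  ("08 11", "porte"),
  ("08 14", "porte"),
  ("08 12", "porte"),
  ("08 71", "quincaillerie_porte"),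
  ("08 51", "fenêtre"),
  ("08 52", "fenêtre"),
  ("08 53", "fenêtre"),
  ("08 50", "fenêtre"),
  ("09 51", "plafond"),
  ("09 54", "plafond"),
  ("09 21", "mur"),
  ("09 22", "mur"),
  ("09 29", "mur"),
  ("04 22", "maçonnerie"),
  ("09 30", "céramique"),
  ("09 31", "céramique"),
  ("07 21", "isolation"),
  ("07 22", "isolation"),
  ("07 27", "isolation"),
  ("07 92", "étanchéité"),
  ("07 90", "étanchéité"),
  ("07 50", "toiture"),
  ("07 51", "toiture"),
  ("07 52", "toiture"),
  ("05 12", "acier"),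
  ("05 21", "acier"),
  ("05 50", "métaux"),
  ("03 30", "béton"),
  ("03 31", "béton"),
  ("26", "électricité"),
  ("22", "plomberie"),
  ("23", "mécanique"),
  ("21 13", "gicleurs")
]

def csiDict : PySem.Dict String String := PySem.Dict.ofList csiItems

-- A's for-loop over CSI_TYPE_MAPPING.items() with its break
def csiScan : List (String × String) → String → List String
  | [], _ => []
  | (pre, matType) :: rest, c =>
    if PySem.Str.startswith c pre then [matType] else csiScan rest c

def detect_types_from_csi (csi_code : String) : List String :=
  if csi_code.toList = [] then [] else csiScan csiDict.items csi_code

-- ===== PORT B =====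
-- B's module-level two-level table CSI_BY_FAMILY (family → suffix → type)
def fam09 : PySem.Dict String String := PySem.Dict.ofList [(" 91", "peinture"), (" 90", "peinture"), (" 65", "plancher"), (" 68", "plancher"), (" 64", "plancher"), (" 63", "plancher"), (" 62", "plancher"), (" 51", "plafond"), (" 54", "plafond"), (" 21", "mur"), (" 22", "mur"), (" 29", "mur"), (" 30", "céramique"), (" 31", "céramique")]
def fam08 : PySem.Dict String String := PySem.Dict.ofList [(" 11", "porte"), (" 14", "porte"), (" 12", "porte"), (" 71", "quincaillerie_porte"), (" 51", "fenêtre"), (" 52", "fenêtre"), (" 53", "fenêtre"), (" 50", "fenêtre")]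
def fam04 : PySem.Dict String String := PySem.Dict.ofList [(" 22", "maçonnerie")]
def fam07 : PySem.Dict String String := PySem.Dict.ofList [(" 21", "isolation"), (" 22", "isolation"), (" 27", "isolation"), (" 92", "étanchéité"), (" 90", "étanchéité"), (" 50", "toiture"), (" 51", "toiture"), (" 52", "toiture")]
def fam05 : PySem.Dict String String := PySem.Dict.ofList [(" 12", "acier"), (" 21", "acier"), (" 50", "métaux")]
def fam03 : PySem.Dict String String := PySem.Dict.ofList [(" 30", "béton"), (" 31", "béton")]
def fam26 : PySem.Dict String String := PySem.Dict.ofList [("", "électricité")]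
def fam22 : PySem.Dict String String := PySem.Dict.ofList [("", "plomberie")]
def fam23 : PySem.Dict String String := PySem.Dict.ofList [("", "mécanique")]
def fam21 : PySem.Dict String String := PySem.Dict.ofList [(" 13", "gicleurs")]

def csiByFamily : PySem.Dict String (PySem.Dict String String) :=
  PySem.Dict.ofList [("09", fam09), ("08", fam08), ("04", fam04), ("07", fam07), ("05", fam05), ("03", fam03), ("26", fam26), ("22", fam22), ("23", fam23), ("21", fam21)]

def detect_types_from_csi_alt (csi_code : String) : List String :=
  match csiByFamily.get? (PySem.Str.slice csi_code none (some 2)) with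
  | none => []
  | some sub =>
    match sub.get? (PySem.Str.slice csi_code (some 2) (some 5)) with
    | some mat => [mat]
    | none =>
      match sub.get? "" with
      | some mat => [mat]
      | none => []

-- ===== PRECONDITION & SPEC =====
def Spec_detect_types_from_csi (csi_code : String) (out : List String) : Prop := out = detect_types_from_csi_alt csi_code
instance (csi_code : String) (out : List String) : Decidable (Spec_detect_types_from_csi csi_code out) := by unfold Spec_detect_types_from_csi; infer_instance

-- ===== CLAIM =====
def Claim_equal_detect_types_from_csi : Prop := ∀ (csi_code : String), Dom_detect_types_from_csi csi_code → Spec_detect_types_from_csi csi_code (detect_types_from_csi csi_code)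

-- ===== LEMMAS AND PROOFS =====

set_option maxRecDepth 8192 in
lemma items_eq : csiDict.items = csiItems := by decide

lemma fam09_items : fam09.items = [(" 91", "peinture"), (" 90", "peinture"), (" 65", "plancher"), (" 68", "plancher"), (" 64", "plancher"), (" 63", "plancher"), (" 62", "plancher"), (" 51", "plafond"), (" 54", "plafond"), (" 21", "mur"), (" 22", "mur"), (" 29", "mur"), (" 30", "céramique"), (" 31", "céramique")] := by decide
lemma fam08_items : fam08.items = [(" 11", "porte"), (" 14", "porte"), (" 12", "porte"), (" 71", "quincaillerie_porte"), (" 51", "fenêtre"), (" 52", "fenêtre"), (" 53", "fenêtre"), (" 50", "fenêtre")] := by decide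
lemma fam04_items : fam04.items = [(" 22", "maçonnerie")] := by decide
lemma fam07_items : fam07.items = [(" 21", "isolation"), (" 22", "isolation"), (" 27", "isolation"), (" 92", "étanchéité"), (" 90", "étanchéité"), (" 50", "toiture"), (" 51", "toiture"), (" 52", "toiture")] := by decide
lemma fam05_items : fam05.items = [(" 12", "acier"), (" 21", "acier"), (" 50", "métaux")] := by decide
lemma fam03_items : fam03.items = [(" 30", "béton"), (" 31", "béton")] := by decide
lemma fam26_items : fam26.items = [("", "électricité")] := by decide
lemma fam22_items : fam22.items = [("", "plomberie")] := by decide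
lemma fam23_items : fam23.items = [("", "mécanique")] := by decide
lemma fam21_items : fam21.items = [(" 13", "gicleurs")] := by decide

set_option maxRecDepth 8192 in
lemma fams_items : csiByFamily.items = [("09", fam09), ("08", fam08), ("04", fam04), ("07", fam07), ("05", fam05), ("03", fam03), ("26", fam26), ("22", fam22), ("23", fam23), ("21", fam21)] := by decide

lemma strbeq (k s : String) : (k == s) = decide (s.toList = k.toList) := by
  by_cases h : s = k
  · subst h; simp
  · have h2 : ¬ (s.toList = k.toList) := fun e => h (String.toList_inj.mp e)
    simp [beq_eq_false_iff_ne.mpr (Ne.symm h), h2]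

lemma sw_take (c k : String) :
    PySem.Str.startswith c k = decide (c.toList.take k.toList.length = k.toList) := by
  have hiff : PySem.Chars.startswith c.toList k.toList = true ↔
      c.toList.take k.toList.length = k.toList := by
    rw [PySem.Chars.startswith_iff, List.prefix_iff_eq_take]
    exact eq_comm
  show PySem.Chars.startswith c.toList k.toList = _
  rw [Bool.eq_iff_iff, hiff, decide_eq_true_eq]

lemma sw_take' (c k : String) (n : Nat) (hn : k.toList.length = n) :
    PySem.Str.startswith c k = decide (c.toList.take n = k.toList) := by
  subst hn; exact sw_take c k

lemma take5_split (l k2 k3 : List Char) (h2 : k2.length = 2) :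
    l.take 5 = k2 ++ k3 ↔ (l.take 2 = k2 ∧ (l.drop 2).take 3 = k3) := by
  constructor
  · intro h
    have htk : List.take 2 (k2 ++ k3) = k2 := by rw [← h2, List.take_left]
    have hdk : List.drop 2 (k2 ++ k3) = k3 := by rw [← h2, List.drop_left]
    constructor
    · have := congrArg (List.take 2) h
      rwa [List.take_take, show min 2 5 = 2 from rfl, htk] at this
    · have := congrArg (List.drop 2) h
      rwa [List.drop_take, show (5 - 2 : Nat) = 3 from rfl, hdk] at this
  · rintro ⟨ha, hb⟩
    rw [show (5 : Nat) = 2 + 3 from rfl, List.take_add, ha, hb]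

lemma sw5 (c k k2 k3 : String) (hsplit : k.toList = k2.toList ++ k3.toList)
    (h2 : k2.toList.length = 2) (h5 : k.toList.length = 5) :
    PySem.Str.startswith c k =
      (decide (c.toList.take 2 = k2.toList) && decide ((c.toList.drop 2).take 3 = k3.toList)) := by
  rw [sw_take' c k 5 h5, hsplit, decide_eq_decide.mpr (take5_split c.toList k2.toList k3.toList h2), Bool.decide_and]

lemma slice2_toList (l : List Char) : PySem.List.slice l none (some 2) = l.take 2 := by
  rw [PySem.List.slice_to l (b := 2) (by norm_num)]; rfl

lemma slice25_toList (l : List Char) : PySem.List.slice l (some 2) (some 5) = (l.drop 2).take 3 := by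
  rw [show (some (2 : Int)) = some ((2 : Nat) : Int) from rfl,
    show (some (5 : Int)) = some ((5 : Nat) : Int) from rfl,
    PySem.List.slice_natCast]

set_option maxRecDepth 100000 in
theorem detect_types_from_csi_spec : Claim_equal_detect_types_from_csi := by
  intro c _
  show detect_types_from_csi c = detect_types_from_csi_alt c
  by_cases he : c.toList = []
  · have hc : c = "" := String.toList_inj.mp (by rw [he]; rfl)
    subst hc; decide
  unfold detect_types_from_csi detect_types_from_csi_alt
  rw [if_neg he, items_eq]
  simp only [csiScan, csiItems]
  rw [sw5 c "09 91" "09" " 91" (by decide) (by decide) (by decide),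
    sw5 c "09 90" "09" " 90" (by decide) (by decide) (by decide),
    sw5 c "09 65" "09" " 65" (by decide) (by decide) (by decide),
    sw5 c "09 68" "09" " 68" (by decide) (by decide) (by decide),
    sw5 c "09 64" "09" " 64" (by decide) (by decide) (by decide),
    sw5 c "09 63" "09" " 63" (by decide) (by decide) (by decide),
    sw5 c "09 62" "09" " 62" (by decide) (by decide) (by decide),
    sw5 c "08 11" "08" " 11" (by decide) (by decide) (by decide),
    sw5 c "08 14" "08" " 14" (by decide) (by decide) (by decide),
    sw5 c "08 12" "08" " 12" (by decide) (by decide) (by decide),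
    sw5 c "08 71" "08" " 71" (by decide) (by decide) (by decide),
    sw5 c "08 51" "08" " 51" (by decide) (by decide) (by decide),
    sw5 c "08 52" "08" " 52" (by decide) (by decide) (by decide),
    sw5 c "08 53" "08" " 53" (by decide) (by decide) (by decide),
    sw5 c "08 50" "08" " 50" (by decide) (by decide) (by decide),
    sw5 c "09 51" "09" " 51" (by decide) (by decide) (by decide),
    sw5 c "09 54" "09" " 54" (by decide) (by decide) (by decide),
    sw5 c "09 21" "09" " 21" (by decide) (by decide) (by decide),
    sw5 c "09 22" "09" " 22" (by decide) (by decide) (by decide),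
    sw5 c "09 29" "09" " 29" (by decide) (by decide) (by decide),
    sw5 c "04 22" "04" " 22" (by decide) (by decide) (by decide),
    sw5 c "09 30" "09" " 30" (by decide) (by decide) (by decide),
    sw5 c "09 31" "09" " 31" (by decide) (by decide) (by decide),
    sw5 c "07 21" "07" " 21" (by decide) (by decide) (by decide),
    sw5 c "07 22" "07" " 22" (by decide) (by decide) (by decide),
    sw5 c "07 27" "07" " 27" (by decide) (by decide) (by decide),
    sw5 c "07 92" "07" " 92" (by decide) (by decide) (by decide),
    sw5 c "07 90" "07" " 90" (by decide) (by decide) (by decide),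
    sw5 c "07 50" "07" " 50" (by decide) (by decide) (by decide),
    sw5 c "07 51" "07" " 51" (by decide) (by decide) (by decide),
    sw5 c "07 52" "07" " 52" (by decide) (by decide) (by decide),
    sw5 c "05 12" "05" " 12" (by decide) (by decide) (by decide),
    sw5 c "05 21" "05" " 21" (by decide) (by decide) (by decide),
    sw5 c "05 50" "05" " 50" (by decide) (by decide) (by decide),
    sw5 c "03 30" "03" " 30" (by decide) (by decide) (by decide),
    sw5 c "03 31" "03" " 31" (by decide) (by decide) (by decide),
    sw_take' c "26" 2 (by decide),
    sw_take' c "22" 2 (by decide),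
    sw_take' c "23" 2 (by decide),
    sw5 c "21 13" "21" " 13" (by decide) (by decide) (by decide)]
  by_cases g09 : c.toList.take 2 = (['0', '9'] : List Char)
  · -- family 09
    by_cases h09_0 : (c.toList.drop 2).take 3 = ([' ', '9', '1'] : List Char)
    · simp [PySem.Dict.get?, fams_items, fam09_items, strbeq, slice2_toList, slice25_toList, g09, h09_0]
    by_cases h09_1 : (c.toList.drop 2).take 3 = ([' ', '9', '0'] : List Char)
    · simp [PySem.Dict.get?, fams_items, fam09_items, List.find?, strbeq, slice2_toList, slice25_toList, g09, h09_1]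
    by_cases h09_2 : (c.toList.drop 2).take 3 = ([' ', '6', '5'] : List Char)
    · simp [PySem.Dict.get?, fams_items, fam09_items, List.find?, strbeq, slice2_toList, slice25_toList, g09, h09_2]
    by_cases h09_3 : (c.toList.drop 2).take 3 = ([' ', '6', '8'] : List Char)
    · simp [PySem.Dict.get?, fams_items, fam09_items, List.find?, strbeq, slice2_toList, slice25_toList, g09, h09_3]
    by_cases h09_4 : (c.toList.drop 2).take 3 = ([' ', '6', '4'] : List Char)
    · simp [PySem.Dict.get?, fams_items, fam09_items, List.find?, strbeq, slice2_toList, slice25_toList, g09, h09_4]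
    by_cases h09_5 : (c.toList.drop 2).take 3 = ([' ', '6', '3'] : List Char)
    · simp [PySem.Dict.get?, fams_items, fam09_items, List.find?, strbeq, slice2_toList, slice25_toList, g09, h09_5]
    by_cases h09_6 : (c.toList.drop 2).take 3 = ([' ', '6', '2'] : List Char)
    · simp [PySem.Dict.get?, fams_items, fam09_items, List.find?, strbeq, slice2_toList, slice25_toList, g09, h09_6]
    by_cases h09_7 : (c.toList.drop 2).take 3 = ([' ', '5', '1'] : List Char)
    · simp [PySem.Dict.get?, fams_items, fam09_items, List.find?, strbeq, slice2_toList, slice25_toList, g09, h09_7]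
    by_cases h09_8 : (c.toList.drop 2).take 3 = ([' ', '5', '4'] : List Char)
    · simp [PySem.Dict.get?, fams_items, fam09_items, List.find?, strbeq, slice2_toList, slice25_toList, g09, h09_8]
    by_cases h09_9 : (c.toList.drop 2).take 3 = ([' ', '2', '1'] : List Char)
    · simp [PySem.Dict.get?, fams_items, fam09_items, List.find?, strbeq, slice2_toList, slice25_toList, g09, h09_9]
    by_cases h09_10 : (c.toList.drop 2).take 3 = ([' ', '2', '2'] : List Char)
    · simp [PySem.Dict.get?, fams_items, fam09_items, List.find?, strbeq, slice2_toList, slice25_toList, g09, h09_10]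
    by_cases h09_11 : (c.toList.drop 2).take 3 = ([' ', '2', '9'] : List Char)
    · simp [PySem.Dict.get?, fams_items, fam09_items, List.find?, strbeq, slice2_toList, slice25_toList, g09, h09_11]
    by_cases h09_12 : (c.toList.drop 2).take 3 = ([' ', '3', '0'] : List Char)
    · simp [PySem.Dict.get?, fams_items, fam09_items, List.find?, strbeq, slice2_toList, slice25_toList, g09, h09_12]
    by_cases h09_13 : (c.toList.drop 2).take 3 = ([' ', '3', '1'] : List Char)
    · simp [PySem.Dict.get?, fams_items, fam09_items, List.find?, strbeq, slice2_toList, slice25_toList, g09, h09_13]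
    simp [PySem.Dict.get?, fams_items, fam09_items, List.find?, strbeq, slice2_toList, slice25_toList, g09, h09_0, h09_1, h09_2, h09_3, h09_4, h09_5, h09_6, h09_7, h09_8, h09_9, h09_10, h09_11, h09_12, h09_13]
  by_cases g08 : c.toList.take 2 = (['0', '8'] : List Char)
  · -- family 08
    by_cases h08_0 : (c.toList.drop 2).take 3 = ([' ', '1', '1'] : List Char)
    · simp [PySem.Dict.get?, fams_items, fam08_items, List.find?, strbeq, slice2_toList, slice25_toList, g08, h08_0]
    by_cases h08_1 : (c.toList.drop 2).take 3 = ([' ', '1', '4'] : List Char)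
    · simp [PySem.Dict.get?, fams_items, fam08_items, List.find?, strbeq, slice2_toList, slice25_toList, g08, h08_1]
    by_cases h08_2 : (c.toList.drop 2).take 3 = ([' ', '1', '2'] : List Char)
    · simp [PySem.Dict.get?, fams_items, fam08_items, List.find?, strbeq, slice2_toList, slice25_toList, g08, h08_2]
    by_cases h08_3 : (c.toList.drop 2).take 3 = ([' ', '7', '1'] : List Char)
    · simp [PySem.Dict.get?, fams_items, fam08_items, List.find?, strbeq, slice2_toList, slice25_toList, g08, h08_3]
    by_cases h08_4 : (c.toList.drop 2).take 3 = ([' ', '5', '1'] : List Char)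
    · simp [PySem.Dict.get?, fams_items, fam08_items, List.find?, strbeq, slice2_toList, slice25_toList, g08, h08_4]
    by_cases h08_5 : (c.toList.drop 2).take 3 = ([' ', '5', '2'] : List Char)
    · simp [PySem.Dict.get?, fams_items, fam08_items, List.find?, strbeq, slice2_toList, slice25_toList, g08, h08_5]
    by_cases h08_6 : (c.toList.drop 2).take 3 = ([' ', '5', '3'] : List Char)
    · simp [PySem.Dict.get?, fams_items, fam08_items, List.find?, strbeq, slice2_toList, slice25_toList, g08, h08_6]
    by_cases h08_7 : (c.toList.drop 2).take 3 = ([' ', '5', '0'] : List Char)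
    · simp [PySem.Dict.get?, fams_items, fam08_items, List.find?, strbeq, slice2_toList, slice25_toList, g08, h08_7]
    simp [PySem.Dict.get?, fams_items, fam08_items, List.find?, strbeq, slice2_toList, slice25_toList, g08, h08_0, h08_1, h08_2, h08_3, h08_4, h08_5, h08_6, h08_7]
  by_cases g04 : c.toList.take 2 = (['0', '4'] : List Char)
  · -- family 04
    by_cases h04_0 : (c.toList.drop 2).take 3 = ([' ', '2', '2'] : List Char)
    · simp [PySem.Dict.get?, fams_items, fam04_items, List.find?, strbeq, slice2_toList, slice25_toList, g04, h04_0]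
    simp [PySem.Dict.get?, fams_items, fam04_items, List.find?, strbeq, slice2_toList, slice25_toList, g04, h04_0]
  by_cases g07 : c.toList.take 2 = (['0', '7'] : List Char)
  · -- family 07
    by_cases h07_0 : (c.toList.drop 2).take 3 = ([' ', '2', '1'] : List Char)
    · simp [PySem.Dict.get?, fams_items, fam07_items, List.find?, strbeq, slice2_toList, slice25_toList, g07, h07_0]
    by_cases h07_1 : (c.toList.drop 2).take 3 = ([' ', '2', '2'] : List Char)
    · simp [PySem.Dict.get?, fams_items, fam07_items, List.find?, strbeq, slice2_toList, slice25_toList, g07, h07_1]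
    by_cases h07_2 : (c.toList.drop 2).take 3 = ([' ', '2', '7'] : List Char)
    · simp [PySem.Dict.get?, fams_items, fam07_items, List.find?, strbeq, slice2_toList, slice25_toList, g07, h07_2]
    by_cases h07_3 : (c.toList.drop 2).take 3 = ([' ', '9', '2'] : List Char)
    · simp [PySem.Dict.get?, fams_items, fam07_items, List.find?, strbeq, slice2_toList, slice25_toList, g07, h07_3]
    by_cases h07_4 : (c.toList.drop 2).take 3 = ([' ', '9', '0'] : List Char)
    · simp [PySem.Dict.get?, fams_items, fam07_items, List.find?, strbeq, slice2_toList, slice25_toList, g07, h07_4]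
    by_cases h07_5 : (c.toList.drop 2).take 3 = ([' ', '5', '0'] : List Char)
    · simp [PySem.Dict.get?, fams_items, fam07_items, List.find?, strbeq, slice2_toList, slice25_toList, g07, h07_5]
    by_cases h07_6 : (c.toList.drop 2).take 3 = ([' ', '5', '1'] : List Char)
    · simp [PySem.Dict.get?, fams_items, fam07_items, List.find?, strbeq, slice2_toList, slice25_toList, g07, h07_6]
    by_cases h07_7 : (c.toList.drop 2).take 3 = ([' ', '5', '2'] : List Char)
    · simp [PySem.Dict.get?, fams_items, fam07_items, List.find?, strbeq, slice2_toList, slice25_toList, g07, h07_7]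
    simp [PySem.Dict.get?, fams_items, fam07_items, List.find?, strbeq, slice2_toList, slice25_toList, g07, h07_0, h07_1, h07_2, h07_3, h07_4, h07_5, h07_6, h07_7]
  by_cases g05 : c.toList.take 2 = (['0', '5'] : List Char)
  · -- family 05
    by_cases h05_0 : (c.toList.drop 2).take 3 = ([' ', '1', '2'] : List Char)
    · simp [PySem.Dict.get?, fams_items, fam05_items, List.find?, strbeq, slice2_toList, slice25_toList, g05, h05_0]
    by_cases h05_1 : (c.toList.drop 2).take 3 = ([' ', '2', '1'] : List Char)
    · simp [PySem.Dict.get?, fams_items, fam05_items, List.find?, strbeq, slice2_toList, slice25_toList, g05, h05_1]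
    by_cases h05_2 : (c.toList.drop 2).take 3 = ([' ', '5', '0'] : List Char)
    · simp [PySem.Dict.get?, fams_items, fam05_items, List.find?, strbeq, slice2_toList, slice25_toList, g05, h05_2]
    simp [PySem.Dict.get?, fams_items, fam05_items, List.find?, strbeq, slice2_toList, slice25_toList, g05, h05_0, h05_1, h05_2]
  by_cases g03 : c.toList.take 2 = (['0', '3'] : List Char)
  · -- family 03
    by_cases h03_0 : (c.toList.drop 2).take 3 = ([' ', '3', '0'] : List Char)
    · simp [PySem.Dict.get?, fams_items, fam03_items, List.find?, strbeq, slice2_toList, slice25_toList, g03, h03_0]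
    by_cases h03_1 : (c.toList.drop 2).take 3 = ([' ', '3', '1'] : List Char)
    · simp [PySem.Dict.get?, fams_items, fam03_items, List.find?, strbeq, slice2_toList, slice25_toList, g03, h03_1]
    simp [PySem.Dict.get?, fams_items, fam03_items, List.find?, strbeq, slice2_toList, slice25_toList, g03, h03_0, h03_1]
  by_cases g26 : c.toList.take 2 = (['2', '6'] : List Char)
  · -- family 26
    by_cases h26_0 : (c.toList.drop 2).take 3 = ([] : List Char)
    · simp [PySem.Dict.get?, fams_items, fam26_items, List.find?, strbeq, slice2_toList, slice25_toList, g26, h26_0]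
    simp [PySem.Dict.get?, fams_items, fam26_items, List.find?, strbeq, slice2_toList, slice25_toList, g26, h26_0]
  by_cases g22 : c.toList.take 2 = (['2', '2'] : List Char)
  · -- family 22
    by_cases h22_0 : (c.toList.drop 2).take 3 = ([] : List Char)
    · simp [PySem.Dict.get?, fams_items, fam22_items, List.find?, strbeq, slice2_toList, slice25_toList, g22, h22_0]
    simp [PySem.Dict.get?, fams_items, fam22_items, List.find?, strbeq, slice2_toList, slice25_toList, g22, h22_0]
  by_cases g23 : c.toList.take 2 = (['2', '3'] : List Char)
  · -- family 23
    by_cases h23_0 : (c.toList.drop 2).take 3 = ([] : List Char)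
    · simp [PySem.Dict.get?, fams_items, fam23_items, List.find?, strbeq, slice2_toList, slice25_toList, g23, h23_0]
    simp [PySem.Dict.get?, fams_items, fam23_items, List.find?, strbeq, slice2_toList, slice25_toList, g23, h23_0]
  by_cases g21 : c.toList.take 2 = (['2', '1'] : List Char)
  · -- family 21
    by_cases h21_0 : (c.toList.drop 2).take 3 = ([' ', '1', '3'] : List Char)
    · simp [PySem.Dict.get?, fams_items, fam21_items, List.find?, strbeq, slice2_toList, slice25_toList, g21, h21_0]
    simp [PySem.Dict.get?, fams_items, fam21_items, List.find?, strbeq, slice2_toList, slice25_toList, g21, h21_0]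
  -- no family matches
  simp [PySem.Dict.get?, fams_items, List.find?, strbeq, slice2_toList, g09, g08, g04, g07, g05, g03, g26, g22, g23, g21]
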